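-- pv_equiv track=rewrite | github.com/FlorianDirnberger/DeepLearning | scripts/modular_train_test.py | is_valid_architecture
-- ===== SOURCE A (Python) =====
-- def is_valid_architecture(input_shape, num_conv_layers, kernel_size, stride, padding, pooling_size):
--     """
--     Validates the compatibility of convolutional and pooling layers with the input dimensions.
--     Args:
--         input_shape (tuple): Shape of the input data (batch_size, channels, height, width).
--         num_conv_layers (int): Number of convolutional layers.
--         kernel_size (tuple): Kernel size for convolution.
--         stride (int): Stride size for convolution.
--         padding (int): Padding size for convolution.
--         pooling_size (int): Pooling size.
--     Returns:
--         bool: True if the architecture is valid, False otherwise.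
--     """
--     _, _, height, width = input_shape
--     current_height, current_width = height, width
--
--     for _ in range(num_conv_layers):
--         # Compute height and width after convolution
--         conv_height = (current_height - kernel_size[0] + 2 * padding) // stride + 1
--         conv_width = (current_width - kernel_size[1] + 2 * padding) // stride + 1
--
--         if conv_height <= 0 or conv_width <= 0:
--             return False  # Invalid dimensions after convolution
--
--         current_height, current_width = conv_height, conv_width
--
--         # Compute height and width after pooling
--         pool_height = current_height // pooling_size
--         pool_width = current_width // pooling_size
--
--         if pool_height <= 0 or pool_width <= 0:
--             return False  # Invalid dimensions after pooling
--
--         current_height, current_width = pool_height, pool_width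
--
--     return True
-- ===== SOURCE B (Python) =====
-- def is_valid_architecture(input_shape, num_conv_layers, kernel_size, stride, padding, pooling_size):
--     _, _, height, width = input_shape
--     # Backward thresholds: after i iterations need_h/need_w are the smallest input
--     # dimensions that survive the first i conv+pool layers (no division needed);
--     # reject as soon as the input falls below them.
--     need_h = need_w = 1
--     for _ in range(num_conv_layers):
--         need_h = (kernel_size[0] - 2 * padding) + stride * (pooling_size * max(need_h, 1) - 1)
--         need_w = (kernel_size[1] - 2 * padding) + stride * (pooling_size * max(need_w, 1) - 1)
--         if height < need_h or width < need_w: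
--             return False
--     return True
-- ===== Notes on version B (the rewrite author's own statement) =====
-- stated objective: alternative
-- what changed: Instead of forward-simulating the height/width through every conv+pool layer with floor divisions and per-layer positivity checks, B iterates the inverse layer map (no division at all) to maintain the smallest input dimensions that survive the layers processed so far, rejecting as soon as height/width fall below these backward thresholds.
-- outside the precondition, e.g. on is_valid_architecture((1, 1, 8, 8), 1, (3, 3), -1, 0, 2): A returns False, B returns True; on is_valid_architecture((1, 1, 8, 8), 1, (3, 3), 1, 0, -2): A returns False, B returns True
import Mathlib
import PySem

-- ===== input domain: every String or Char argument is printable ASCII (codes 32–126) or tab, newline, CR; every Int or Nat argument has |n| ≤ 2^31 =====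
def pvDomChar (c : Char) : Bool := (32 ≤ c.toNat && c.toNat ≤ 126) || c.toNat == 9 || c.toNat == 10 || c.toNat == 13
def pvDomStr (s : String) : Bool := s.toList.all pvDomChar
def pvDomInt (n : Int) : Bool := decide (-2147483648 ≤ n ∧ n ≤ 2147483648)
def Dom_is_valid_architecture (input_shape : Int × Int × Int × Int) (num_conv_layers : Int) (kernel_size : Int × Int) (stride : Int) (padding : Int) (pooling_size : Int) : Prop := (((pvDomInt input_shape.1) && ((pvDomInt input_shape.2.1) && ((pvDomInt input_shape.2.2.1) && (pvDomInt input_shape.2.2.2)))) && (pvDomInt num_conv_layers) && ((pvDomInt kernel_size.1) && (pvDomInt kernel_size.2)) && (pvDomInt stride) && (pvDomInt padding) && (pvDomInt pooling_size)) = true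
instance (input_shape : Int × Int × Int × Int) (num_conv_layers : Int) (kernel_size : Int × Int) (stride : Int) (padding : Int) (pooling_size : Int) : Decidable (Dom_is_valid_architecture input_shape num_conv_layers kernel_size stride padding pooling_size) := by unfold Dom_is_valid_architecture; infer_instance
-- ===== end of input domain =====

-- B replaces forward simulation of the dimensions by a backward computation (no division) of the minimal surviving input size, compared once per axis (alternative algorithm, same cost).


-- ===== PORT A =====
def pvLoopA (n : Nat) (h w ks0 ks1 stride padding pooling : Int) : Bool :=
  match n with
  | 0 => true
  | Nat.succ n =>
    let conv_height := PySem.Int.floordiv (h - ks0 + 2 * padding) stride + 1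
    let conv_width := PySem.Int.floordiv (w - ks1 + 2 * padding) stride + 1
    if conv_height ≤ 0 ∨ conv_width ≤ 0 then false
    else
      let pool_height := PySem.Int.floordiv conv_height pooling
      let pool_width := PySem.Int.floordiv conv_width pooling
      if pool_height ≤ 0 ∨ pool_width ≤ 0 then false
      else pvLoopA n pool_height pool_width ks0 ks1 stride padding pooling

def is_valid_architecture (input_shape : Int × Int × Int × Int) (num_conv_layers : Int) (kernel_size : Int × Int) (stride : Int) (padding : Int) (pooling_size : Int) : Bool :=
  pvLoopA num_conv_layers.toNat input_shape.2.2.1 input_shape.2.2.2 kernel_size.1 kernel_size.2 stride padding pooling_size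

-- ===== PORT B =====
-- B's loop: maintain the smallest surviving input dimensions (backward thresholds), reject early
def pvLoopB (n : Nat) (h w c0 c1 stride pooling nh nw : Int) : Bool :=
  match n with
  | 0 => true
  | Nat.succ n =>
    let nh' := c0 + stride * (pooling * max nh 1 - 1)
    let nw' := c1 + stride * (pooling * max nw 1 - 1)
    if h < nh' ∨ w < nw' then false
    else pvLoopB n h w c0 c1 stride pooling nh' nw'

def is_valid_architecture_alt (input_shape : Int × Int × Int × Int) (num_conv_layers : Int) (kernel_size : Int × Int) (stride : Int) (padding : Int) (pooling_size : Int) : Bool :=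
  pvLoopB num_conv_layers.toNat input_shape.2.2.1 input_shape.2.2.2 (kernel_size.1 - 2 * padding) (kernel_size.2 - 2 * padding) stride pooling_size 1 1

-- ===== PRECONDITION & SPEC =====
-- Pre_ restricts to the natural domain of the hyperparameters: positive stride and pooling size (when at
-- least one conv layer runs). stride = 0 or pooling_size = 0 makes A raise ZeroDivisionError (or return
-- False before reaching the zero division), and negative stride/pooling are meaningless conv/pool
-- hyperparameters on which A's floor-division values are implementation artefacts B does not reproduce.
def Pre_is_valid_architecture (input_shape : Int × Int × Int × Int) (num_conv_layers : Int) (kernel_size : Int × Int) (stride : Int) (padding : Int) (pooling_size : Int) : Prop :=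
  num_conv_layers ≤ 0 ∨ (1 ≤ stride ∧ 1 ≤ pooling_size)
instance (input_shape : Int × Int × Int × Int) (num_conv_layers : Int) (kernel_size : Int × Int) (stride : Int) (padding : Int) (pooling_size : Int) : Decidable (Pre_is_valid_architecture input_shape num_conv_layers kernel_size stride padding pooling_size) := by unfold Pre_is_valid_architecture; infer_instance
def pvWitness_is_valid_architecture : (Int × Int × Int × Int) × Int × (Int × Int) × Int × Int × Int := ((1, 3, 32, 32), 2, (3, 3), 1, 1, 2)

def Spec_is_valid_architecture (input_shape : Int × Int × Int × Int) (num_conv_layers : Int) (kernel_size : Int × Int) (stride : Int) (padding : Int) (pooling_size : Int) (out : Bool) : Prop := out = is_valid_architecture_alt input_shape num_conv_layers kernel_size stride padding pooling_size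
instance (input_shape : Int × Int × Int × Int) (num_conv_layers : Int) (kernel_size : Int × Int) (stride : Int) (padding : Int) (pooling_size : Int) (out : Bool) : Decidable (Spec_is_valid_architecture input_shape num_conv_layers kernel_size stride padding pooling_size out) := by unfold Spec_is_valid_architecture; infer_instance

-- ===== CLAIM (what is proved, stated in full; the proofs are below) =====
def Claim_equal_is_valid_architecture : Prop := ∀ (input_shape : Int × Int × Int × Int) (num_conv_layers : Int) (kernel_size : Int × Int) (stride : Int) (padding : Int) (pooling_size : Int), Dom_is_valid_architecture input_shape num_conv_layers kernel_size stride padding pooling_size → Pre_is_valid_architecture input_shape num_conv_layers kernel_size stride padding pooling_size → Spec_is_valid_architecture input_shape num_conv_layers kernel_size stride padding pooling_size (is_valid_architecture input_shape num_conv_layers kernel_size stride padding pooling_size)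
-- ===== LEMMAS AND PROOFS =====
-- proof-side backward threshold, one axis, outer recursion (pvNeedFn (n+1) = g (pvNeedFn n))
def pvNeedFn (n : Nat) (c s m : Int) : Int :=
  match n with
  | 0 => 1
  | Nat.succ n => c + s * (m * max (pvNeedFn n c s m) 1 - 1)

theorem pv_le_fdiv {b : Int} (hb : 0 < b) (t x : Int) :
    t ≤ PySem.Int.floordiv x b ↔ t * b ≤ x := by
  rw [PySem.Int.floordiv_eq_ediv_of_pos hb]
  exact Int.le_ediv_iff_mul_le hb

-- one conv+pool layer, one axis: surviving with residual requirement t ⟺ input above the backward threshold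
theorem pvAxisIff (h k p s m t : Int) (hs : 1 ≤ s) (hm : 1 ≤ m) :
    (k - 2 * p + s * (m * max t 1 - 1) ≤ h) ↔
      (0 < PySem.Int.floordiv (h - k + 2 * p) s + 1 ∧
       0 < PySem.Int.floordiv (PySem.Int.floordiv (h - k + 2 * p) s + 1) m ∧
       t ≤ PySem.Int.floordiv (PySem.Int.floordiv (h - k + 2 * p) s + 1) m) := by
  have hs0 : (0:Int) < s := by omega
  have hm0 : (0:Int) < m := by omega
  have hconv : ∀ t' : Int, t' ≤ PySem.Int.floordiv (h - k + 2 * p) s + 1 ↔ (t' - 1) * s ≤ h - k + 2 * p := by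
    intro t'
    rw [show (t' ≤ PySem.Int.floordiv (h - k + 2 * p) s + 1) ↔ (t' - 1 ≤ PySem.Int.floordiv (h - k + 2 * p) s) from by omega]
    exact pv_le_fdiv hs0 _ _
  have hpool : ∀ t' : Int, t' ≤ PySem.Int.floordiv (PySem.Int.floordiv (h - k + 2 * p) s + 1) m ↔
      (t' * m - 1) * s ≤ h - k + 2 * p := by
    intro t'
    rw [pv_le_fdiv hm0, hconv]
  rw [show (0 < PySem.Int.floordiv (h - k + 2 * p) s + 1) ↔ (1 ≤ PySem.Int.floordiv (h - k + 2 * p) s + 1) from by omega,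
      show (0 < PySem.Int.floordiv (PySem.Int.floordiv (h - k + 2 * p) s + 1) m) ↔ (1 ≤ PySem.Int.floordiv (PySem.Int.floordiv (h - k + 2 * p) s + 1) m) from by omega,
      hconv, hpool, hpool]
  rcases le_total t 1 with ht | ht
  · rw [max_eq_right ht]
    have htm : t * m ≤ m := by nlinarith [mul_nonneg (by linarith : (0:Int) ≤ 1 - t) (by linarith : (0:Int) ≤ m)]
    constructor
    · intro hx
      refine ⟨?_, ?_, ?_⟩
      · nlinarith [mul_nonneg (by linarith : (0:Int) ≤ s) (by linarith : (0:Int) ≤ m - 1)]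
      · nlinarith
      · nlinarith [mul_nonneg (by linarith : (0:Int) ≤ m - t * m) (by linarith : (0:Int) ≤ s)]
    · rintro ⟨-, h2, -⟩; nlinarith
  · rw [max_eq_left ht]
    have htm : m ≤ t * m := by nlinarith [mul_nonneg (by linarith : (0:Int) ≤ t - 1) (by linarith : (0:Int) ≤ m)]
    constructor
    · intro hx
      refine ⟨?_, ?_, ?_⟩
      · nlinarith [mul_nonneg (by linarith : (0:Int) ≤ t * m - 1) (by linarith : (0:Int) ≤ s)]
      · nlinarith [mul_nonneg (by linarith : (0:Int) ≤ t * m - m) (by linarith : (0:Int) ≤ s)]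
      · nlinarith
    · rintro ⟨-, -, h3⟩; nlinarith

-- A's forward simulation over n+1 layers equals the two backward-threshold comparisons
theorem pvLoopA_eq_need (n : Nat) : ∀ (h w ks0 ks1 s p m : Int), 1 ≤ s → 1 ≤ m →
    pvLoopA (n + 1) h w ks0 ks1 s p m =
      (decide (pvNeedFn (n + 1) (ks0 - 2 * p) s m ≤ h) &&
       decide (pvNeedFn (n + 1) (ks1 - 2 * p) s m ≤ w)) := by
  induction n with
  | zero =>
    intro h w ks0 ks1 s p m hs hm
    have keyH : pvNeedFn (0 + 1) (ks0 - 2 * p) s m ≤ h ↔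
        (0 < PySem.Int.floordiv (h - ks0 + 2 * p) s + 1 ∧
         0 < PySem.Int.floordiv (PySem.Int.floordiv (h - ks0 + 2 * p) s + 1) m ∧
         (1:Int) ≤ PySem.Int.floordiv (PySem.Int.floordiv (h - ks0 + 2 * p) s + 1) m) :=
      pvAxisIff h ks0 p s m 1 hs hm
    have keyW : pvNeedFn (0 + 1) (ks1 - 2 * p) s m ≤ w ↔
        (0 < PySem.Int.floordiv (w - ks1 + 2 * p) s + 1 ∧
         0 < PySem.Int.floordiv (PySem.Int.floordiv (w - ks1 + 2 * p) s + 1) m ∧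
         (1:Int) ≤ PySem.Int.floordiv (PySem.Int.floordiv (w - ks1 + 2 * p) s + 1) m) :=
      pvAxisIff w ks1 p s m 1 hs hm
    simp only [pvLoopA]
    split_ifs with h1 h2 <;>
      · rw [Bool.eq_iff_iff]
        simp only [Bool.and_eq_true, decide_eq_true_eq, Bool.false_eq_true, false_iff, eq_self_iff_true, true_iff]
        rw [keyH, keyW]
        omega
  | succ n ih =>
    intro h w ks0 ks1 s p m hs hm
    have keyH : pvNeedFn (n + 1 + 1) (ks0 - 2 * p) s m ≤ h ↔
        (0 < PySem.Int.floordiv (h - ks0 + 2 * p) s + 1 ∧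
         0 < PySem.Int.floordiv (PySem.Int.floordiv (h - ks0 + 2 * p) s + 1) m ∧
         pvNeedFn (n + 1) (ks0 - 2 * p) s m ≤ PySem.Int.floordiv (PySem.Int.floordiv (h - ks0 + 2 * p) s + 1) m) :=
      pvAxisIff h ks0 p s m (pvNeedFn (n + 1) (ks0 - 2 * p) s m) hs hm
    have keyW : pvNeedFn (n + 1 + 1) (ks1 - 2 * p) s m ≤ w ↔
        (0 < PySem.Int.floordiv (w - ks1 + 2 * p) s + 1 ∧
         0 < PySem.Int.floordiv (PySem.Int.floordiv (w - ks1 + 2 * p) s + 1) m ∧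
         pvNeedFn (n + 1) (ks1 - 2 * p) s m ≤ PySem.Int.floordiv (PySem.Int.floordiv (w - ks1 + 2 * p) s + 1) m) :=
      pvAxisIff w ks1 p s m (pvNeedFn (n + 1) (ks1 - 2 * p) s m) hs hm
    show (let conv_height := PySem.Int.floordiv (h - ks0 + 2 * p) s + 1
          let conv_width := PySem.Int.floordiv (w - ks1 + 2 * p) s + 1
          if conv_height ≤ 0 ∨ conv_width ≤ 0 then false
          else
            let pool_height := PySem.Int.floordiv conv_height m
            let pool_width := PySem.Int.floordiv conv_width m
            if pool_height ≤ 0 ∨ pool_width ≤ 0 then false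
            else pvLoopA (n + 1) pool_height pool_width ks0 ks1 s p m) = _
    simp only []
    split_ifs with h1 h2
    · rw [Bool.eq_iff_iff]
      simp only [Bool.and_eq_true, decide_eq_true_eq, Bool.false_eq_true, false_iff, eq_self_iff_true, true_iff]
      rw [keyH, keyW]
      omega
    · rw [Bool.eq_iff_iff]
      simp only [Bool.and_eq_true, decide_eq_true_eq, Bool.false_eq_true, false_iff, eq_self_iff_true, true_iff]
      rw [keyH, keyW]
      omega
    · rw [ih _ _ ks0 ks1 s p m hs hm, Bool.eq_iff_iff]
      simp only [Bool.and_eq_true, decide_eq_true_eq, eq_self_iff_true]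
      rw [keyH, keyW]
      omega

-- thresholds only grow from step 1 on, and B's early-exit loop equals the final comparison
theorem pvg_mono (c s m x y : Int) (hs : 1 ≤ s) (hm : 1 ≤ m) (hxy : x ≤ y) :
    c + s * (m * max x 1 - 1) ≤ c + s * (m * max y 1 - 1) := by
  have h1 : max x 1 ≤ max y 1 := max_le_max hxy le_rfl
  nlinarith [mul_nonneg (by linarith : (0:Int) ≤ s) (mul_nonneg (by linarith : (0:Int) ≤ m) (by linarith : (0:Int) ≤ max y 1 - max x 1)), mul_le_mul_of_nonneg_left h1 (by linarith : (0:Int) ≤ m)]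

theorem pvNeedFn_step_mono (k : Nat) (c s m : Int) (hs : 1 ≤ s) (hm : 1 ≤ m) :
    pvNeedFn (k + 1) c s m ≤ pvNeedFn (k + 2) c s m := by
  induction k with
  | zero =>
    have key : ∀ X : Int, c + s * (m * 1 - 1) ≤ c + s * (m * max X 1 - 1) := by
      intro X
      have h1 : (1:Int) ≤ max X 1 := le_max_right _ _
      nlinarith [mul_nonneg (by linarith : (0:Int) ≤ s) (mul_nonneg (by linarith : (0:Int) ≤ m) (by linarith : (0:Int) ≤ max X 1 - 1))]
    have h2 : pvNeedFn 1 c s m = c + s * (m * 1 - 1) := by norm_num [pvNeedFn]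
    show pvNeedFn 1 c s m ≤ c + s * (m * max (pvNeedFn 1 c s m) 1 - 1)
    rw [h2]
    exact key (c + s * (m * 1 - 1))
  | succ k ih => exact pvg_mono c s m _ _ hs hm ih

theorem pvNeedFn_mono (i j : Nat) (c s m : Int) (hs : 1 ≤ s) (hm : 1 ≤ m) (hi : 1 ≤ i) (hij : i ≤ j) :
    pvNeedFn i c s m ≤ pvNeedFn j c s m := by
  induction j, hij using Nat.le_induction with
  | base => exact le_rfl
  | succ j hij ih =>
    obtain ⟨k, rfl⟩ : ∃ k, j = k + 1 := ⟨j - 1, by omega⟩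
    exact le_trans ih (pvNeedFn_step_mono k c s m hs hm)

theorem pvLoopB_eq_need (n : Nat) : ∀ (k : Nat) (h w c0 c1 s m : Int), 1 ≤ s → 1 ≤ m → 1 ≤ k →
    pvNeedFn k c0 s m ≤ h → pvNeedFn k c1 s m ≤ w →
    pvLoopB n h w c0 c1 s m (pvNeedFn k c0 s m) (pvNeedFn k c1 s m) =
      (decide (pvNeedFn (k + n) c0 s m ≤ h) && decide (pvNeedFn (k + n) c1 s m ≤ w)) := by
  induction n with
  | zero =>
    intro k h w c0 c1 s m hs hm hk hh hw
    simp [pvLoopB, hh, hw]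
  | succ n ih =>
    intro k h w c0 c1 s m hs hm hk hh hw
    have e0 : c0 + s * (m * max (pvNeedFn k c0 s m) 1 - 1) = pvNeedFn (k + 1) c0 s m := rfl
    have e1 : c1 + s * (m * max (pvNeedFn k c1 s m) 1 - 1) = pvNeedFn (k + 1) c1 s m := rfl
    simp only [pvLoopB, e0, e1]
    split_ifs with h1
    · have m0 := pvNeedFn_mono (k + 1) (k + (n + 1)) c0 s m hs hm (by omega) (by omega)
      have m1 := pvNeedFn_mono (k + 1) (k + (n + 1)) c1 s m hs hm (by omega) (by omega)
      rw [Bool.eq_iff_iff]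
      simp only [Bool.and_eq_true, decide_eq_true_eq, Bool.false_eq_true, false_iff, not_and]
      omega
    · have hh' : pvNeedFn (k + 1) c0 s m ≤ h := by omega
      have hw' : pvNeedFn (k + 1) c1 s m ≤ w := by omega
      rw [ih (k + 1) h w c0 c1 s m hs hm (by omega) hh' hw',
          show k + 1 + n = k + (n + 1) from by omega]

theorem pvLoopB_top (k : Nat) (h w c0 c1 s m : Int) (hs : 1 ≤ s) (hm : 1 ≤ m) :
    pvLoopB (k + 1) h w c0 c1 s m 1 1 =
      (decide (pvNeedFn (k + 1) c0 s m ≤ h) && decide (pvNeedFn (k + 1) c1 s m ≤ w)) := by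
  have e0 : c0 + s * (m * max (1:Int) 1 - 1) = pvNeedFn 1 c0 s m := rfl
  have e1 : c1 + s * (m * max (1:Int) 1 - 1) = pvNeedFn 1 c1 s m := rfl
  simp only [pvLoopB, e0, e1]
  split_ifs with h1
  · have m0 := pvNeedFn_mono 1 (k + 1) c0 s m hs hm (by omega) (by omega)
    have m1 := pvNeedFn_mono 1 (k + 1) c1 s m hs hm (by omega) (by omega)
    rw [Bool.eq_iff_iff]
    simp only [Bool.and_eq_true, decide_eq_true_eq, Bool.false_eq_true, false_iff, not_and]
    omega
  · have hh' : pvNeedFn 1 c0 s m ≤ h := by omega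
    have hw' : pvNeedFn 1 c1 s m ≤ w := by omega
    rw [pvLoopB_eq_need k 1 h w c0 c1 s m hs hm le_rfl hh' hw',
        show 1 + k = k + 1 from by omega]

-- ===== VERDICT (by name: the statement is the Claim_ definition above) =====
theorem is_valid_architecture_spec : Claim_equal_is_valid_architecture := by
  intro input_shape num ks s p m _ hpre
  unfold Spec_is_valid_architecture is_valid_architecture is_valid_architecture_alt
  by_cases hn : num ≤ 0
  · have h0 : num.toNat = 0 := Int.toNat_eq_zero.mpr hn
    simp [h0, pvLoopA, pvLoopB]
  · have hsm : 1 ≤ s ∧ 1 ≤ m := by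
      rcases hpre with h | h
      · omega
      · exact h
    obtain ⟨k, hk⟩ : ∃ k, num.toNat = k + 1 := ⟨num.toNat - 1, by omega⟩
    rw [hk, pvLoopA_eq_need k _ _ _ _ _ _ _ hsm.1 hsm.2, pvLoopB_top k _ _ _ _ _ _ hsm.1 hsm.2]
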